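-- pv_equiv track=rewrite | github.com/shaug/atelier | src/atelier/worker/work_command_helpers.py | _strip_flag_with_value
-- ===== SOURCE A (Python) =====
-- def _strip_flag_with_value(args: list[str], flag: str) -> list[str]:
--     """Return args without instances of `flag` and its value."""
--     cleaned: list[str] = []
--     skip_next = False
--     for token in args:
--         if skip_next:
--             skip_next = False
--             continue
--         if token == flag:
--             skip_next = True
--             continue
--         if token.startswith(f"{flag}="):
--             continue
--         cleaned.append(token)
--     return cleaned
-- ===== SOURCE B (Python) =====
-- def _strip_flag_with_value(args: list[str], flag: str) -> list[str]:
--     """Return args without instances of `flag` and its value."""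
--     prefix = flag + "="
--     blocked: set[int] = set()
--     for i, token in enumerate(args):
--         if i in blocked:
--             continue
--         if token == flag:
--             blocked.add(i)
--             blocked.add(i + 1)
--         elif token.startswith(prefix):
--             blocked.add(i)
--     return [token for i, token in enumerate(args) if i not in blocked]
-- ===== Notes on version B (the rewrite author's own statement) =====
-- stated objective: alternative
-- what changed: Two staged passes instead of one pass with carried skip_next state: a first pass over enumerate(args) builds a set of blocked indices (i and i+1 for a bare flag, i for a flag= token), then a comprehension emits the tokens whose index is not blocked; the flag+'=' prefix is built once instead of an f-string per token.
import Mathlib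
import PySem

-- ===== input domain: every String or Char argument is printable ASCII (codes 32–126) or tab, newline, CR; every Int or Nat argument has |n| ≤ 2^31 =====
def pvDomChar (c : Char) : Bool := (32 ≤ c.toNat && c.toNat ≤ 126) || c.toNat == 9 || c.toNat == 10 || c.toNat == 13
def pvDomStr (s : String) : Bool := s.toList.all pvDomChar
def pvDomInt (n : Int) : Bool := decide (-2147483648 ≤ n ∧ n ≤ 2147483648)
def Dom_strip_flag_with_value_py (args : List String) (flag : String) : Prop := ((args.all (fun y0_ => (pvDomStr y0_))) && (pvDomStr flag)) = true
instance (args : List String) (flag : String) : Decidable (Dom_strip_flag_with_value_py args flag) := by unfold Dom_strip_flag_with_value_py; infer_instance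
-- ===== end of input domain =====

-- B replaces A's single pass with carried skip_next state by two staged passes: first build
-- a set of blocked indices, then emit the tokens whose index is not blocked (the flag+"=" prefix is built once, not per token).

-- ===== PORT A =====
-- for-loop over tokens carrying (cleaned, skip_next); ported as structural recursion over the list
def stripGoA (flag : String) : List String → Bool → List String
  | [], _ => []
  | t :: rest, skip =>
    if skip then stripGoA flag rest false
    else if t == flag then stripGoA flag rest true
    else if PySem.Str.startswith t (flag ++ "=") then stripGoA flag rest false
    else t :: stripGoA flag rest false

def strip_flag_with_value_py (args : List String) (flag : String) : List String :=
  stripGoA flag args false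

-- ===== PORT B =====
-- first pass: the for-loop over enumerate(args) accumulating the blocked-index set
def buildBlocked (flag prefixS : String) : List (Int × String) → PySem.Set Int → PySem.Set Int
  | [], s => s
  | (i, t) :: rest, s =>
    if PySem.Set.contains s i then buildBlocked flag prefixS rest s
    else if t == flag then buildBlocked flag prefixS rest (PySem.Set.add (PySem.Set.add s i) (i + 1))
    else if PySem.Str.startswith t prefixS then buildBlocked flag prefixS rest (PySem.Set.add s i)
    else buildBlocked flag prefixS rest s

def strip_flag_with_value_py_alt (args : List String) (flag : String) : List String :=
  let prefixS := flag ++ "="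
  let blocked := buildBlocked flag prefixS (PySem.List.enumerate args 0) PySem.Set.empty
  -- second pass: the comprehension over enumerate(args) keeping non-blocked indices
  (PySem.List.enumerate args 0).filterMap
    (fun p => if PySem.Set.contains blocked p.1 then none else some p.2)

-- ===== PRECONDITION & SPEC =====
def Spec_strip_flag_with_value_py (args : List String) (flag : String) (out : List String) : Prop := out = strip_flag_with_value_py_alt args flag
instance (args : List String) (flag : String) (out : List String) : Decidable (Spec_strip_flag_with_value_py args flag out) := by unfold Spec_strip_flag_with_value_py; infer_instance

-- ===== CLAIM =====
def Claim_equal_strip_flag_with_value_py : Prop := ∀ (args : List String) (flag : String), Dom_strip_flag_with_value_py args flag → Spec_strip_flag_with_value_py args flag (strip_flag_with_value_py args flag)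

-- ===== LEMMAS AND PROOFS =====

-- the first pass only grows the set
lemma mem_buildBlocked_of_mem (flag pfx : String) (l : List (Int × String)) (S : PySem.Set Int)
    (j : Int) (hj : j ∈ S) : j ∈ buildBlocked flag pfx l S := by
  induction l generalizing S with
  | nil => exact hj
  | cons p rest ih =>
    obtain ⟨i, t⟩ := p
    simp only [buildBlocked]
    split_ifs with h1 h2 h3
    · exact ih S hj
    · exact ih _ (by simp [PySem.Set.mem_add, hj])
    · exact ih _ (by simp [PySem.Set.mem_add, hj])
    · exact ih S hj

-- indices added while processing enumerate args k are ≥ k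
lemma mem_buildBlocked_bound (flag pfx : String) (args : List String) (k : Int)
    (S : PySem.Set Int) (j : Int)
    (hj : j ∈ buildBlocked flag pfx (PySem.List.enumerate args k) S) : j ∈ S ∨ k ≤ j := by
  induction args generalizing k S with
  | nil => exact Or.inl hj
  | cons t rest ih =>
    rw [PySem.List.enumerate_cons] at hj
    simp only [buildBlocked] at hj
    split_ifs at hj with h1 h2 h3
    · rcases ih (k + 1) S hj with h | h
      · exact Or.inl h
      · exact Or.inr (by omega)
    · rcases ih (k + 1) _ hj with h | h
      · simp only [PySem.Set.mem_add] at h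
        rcases h with (h | h) | h
        · exact Or.inl h
        · exact Or.inr (by omega)
        · exact Or.inr (by omega)
      · exact Or.inr (by omega)
    · rcases ih (k + 1) _ hj with h | h
      · simp only [PySem.Set.mem_add] at h
        rcases h with h | h
        · exact Or.inl h
        · exact Or.inr (by omega)
      · exact Or.inr (by omega)
    · rcases ih (k + 1) S hj with h | h
      · exact Or.inl h
      · exact Or.inr (by omega)

-- the staged passes starting at index k with state S compute A's loop with skip = (k ∈ S)
lemma stripKey (flag : String) (args : List String) (k : Int) (S : PySem.Set Int)
    (hS : ∀ j ∈ S, j ≤ k) :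
    (PySem.List.enumerate args k).filterMap
      (fun p => if PySem.Set.contains (buildBlocked flag (flag ++ "=") (PySem.List.enumerate args k) S) p.1 then none else some p.2)
    = stripGoA flag args (PySem.Set.contains S k) := by
  induction args generalizing k S with
  | nil => simp [stripGoA]
  | cons t rest ih =>
    rw [PySem.List.enumerate_cons]
    have hk1 : PySem.Set.contains S (k + 1) = false := by
      by_contra h
      have := hS (k + 1) ((PySem.Set.contains_iff S (k + 1)).mp (by simpa using h))
      omega
    cases hc : PySem.Set.contains S k with
    | true =>
      -- k already blocked: head dropped, skip_next consumed
      have hcf : PySem.Set.contains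
          (buildBlocked flag (flag ++ "=") (PySem.List.enumerate rest (k + 1)) S) k = true :=
        (PySem.Set.contains_iff _ _).mpr
          (mem_buildBlocked_of_mem _ _ _ _ _ ((PySem.Set.contains_iff S k).mp hc))
      simp only [buildBlocked, hc, ite_true, List.filterMap_cons, hcf, stripGoA]
      rw [ih (k + 1) S (fun j hj => by have := hS j hj; omega), hk1]
    | false =>
      cases ht : (t == flag) with
      | true =>
        -- bare flag: block k and k+1
        have hcf : PySem.Set.contains (buildBlocked flag (flag ++ "=")
            (PySem.List.enumerate rest (k + 1))
            (PySem.Set.add (PySem.Set.add S k) (k + 1))) k = true :=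
          (PySem.Set.contains_iff _ _).mpr
            (mem_buildBlocked_of_mem _ _ _ _ _ (by simp [PySem.Set.mem_add]))
        simp only [buildBlocked, hc, ht, Bool.false_eq_true, ite_false, ite_true,
          List.filterMap_cons, hcf, stripGoA]
        have hbound : ∀ j ∈ PySem.Set.add (PySem.Set.add S k) (k + 1), j ≤ k + 1 := by
          intro j hj
          simp only [PySem.Set.mem_add] at hj
          rcases hj with (hj | hj) | hj
          · have := hS j hj; omega
          · omega
          · omega
        rw [ih (k + 1) _ hbound,
          (PySem.Set.contains_iff _ _).mpr (show (k + 1 : Int) ∈ _ by simp [PySem.Set.mem_add])]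
      | false =>
        cases hp : PySem.Str.startswith t (flag ++ "=") with
        | true =>
          -- flag=value form: block k only
          have hcf : PySem.Set.contains (buildBlocked flag (flag ++ "=")
              (PySem.List.enumerate rest (k + 1)) (PySem.Set.add S k)) k = true :=
            (PySem.Set.contains_iff _ _).mpr
              (mem_buildBlocked_of_mem _ _ _ _ _ (by simp [PySem.Set.mem_add]))
          simp only [buildBlocked, hc, ht, hp, Bool.false_eq_true, ite_false, ite_true,
            List.filterMap_cons, hcf, stripGoA]
          have hbound : ∀ j ∈ PySem.Set.add S k, j ≤ k + 1 := by
            intro j hj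
            simp only [PySem.Set.mem_add] at hj
            rcases hj with hj | hj
            · have := hS j hj; omega
            · omega
          have hS'k1 : PySem.Set.contains (PySem.Set.add S k) (k + 1) = false := by
            by_contra h
            have hm : k + 1 ∈ PySem.Set.add S k := by simpa using h
            simp only [PySem.Set.mem_add] at hm
            rcases hm with h' | h'
            · have := hS _ h'; omega
            · omega
          rw [ih (k + 1) _ hbound, hS'k1]
        | false =>
          -- ordinary token: kept
          have hcf : PySem.Set.contains (buildBlocked flag (flag ++ "=")
              (PySem.List.enumerate rest (k + 1)) S) k = false := by
            by_contra h
            have hm : k ∈ buildBlocked flag (flag ++ "=") (PySem.List.enumerate rest (k + 1)) S := by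
              simpa using h
            rcases mem_buildBlocked_bound _ _ _ _ _ _ hm with h' | h'
            · exact absurd h' (by simpa using hc)
            · omega
          simp only [buildBlocked, hc, ht, hp, Bool.false_eq_true, ite_false,
            List.filterMap_cons, hcf, stripGoA]
          rw [ih (k + 1) S (fun j hj => by have := hS j hj; omega), hk1]

-- ===== VERDICT =====
theorem strip_flag_with_value_py_spec : Claim_equal_strip_flag_with_value_py := by
  intro args flag _
  unfold Spec_strip_flag_with_value_py strip_flag_with_value_py strip_flag_with_value_py_alt
  rw [stripKey flag args 0 PySem.Set.empty (by intro j hj; cases hj)]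
  rfl
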